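-- pv_equiv track=rewrite | github.com/fabricenativel/cpge-info | docs/itc/Cours/C7/pyramide.py | somme_glouton
-- ===== SOURCE A (Python) =====
-- def somme_glouton(pyramide,i,j):
--     if i==len(pyramide)-1:
--         return pyramide[i][j]
--     if pyramide[i+1][j]>pyramide[i+1][j+1]:
--         sous_somme = somme_glouton(pyramide,i+1,j)
--     else:
--         sous_somme = somme_glouton(pyramide,i+1,j+1)
--     return pyramide[i][j]+sous_somme
-- ===== SOURCE B (Python) =====
-- def somme_glouton(pyramide, i, j):
--     total = 0
--     while i < len(pyramide) - 1:
--         total += pyramide[i][j]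
--         if pyramide[i+1][j] <= pyramide[i+1][j+1]:
--             j += 1
--         i += 1
--     return total + pyramide[i][j]
-- ===== Notes on version B (the rewrite author's own statement) =====
-- stated objective: simpler
-- what changed: Replaces the recursive descent (which unwinds a call per row) with an iterative loop keeping only a running total and the current column.
-- outside the precondition, e.g. on somme_glouton([[1], [9, 2], [5, 5]], 0, 0): A returns 15, B returns 15; on somme_glouton([[1, 2], [3, 4]], 0, -2): A returns 5, B returns 5
import Mathlib
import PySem

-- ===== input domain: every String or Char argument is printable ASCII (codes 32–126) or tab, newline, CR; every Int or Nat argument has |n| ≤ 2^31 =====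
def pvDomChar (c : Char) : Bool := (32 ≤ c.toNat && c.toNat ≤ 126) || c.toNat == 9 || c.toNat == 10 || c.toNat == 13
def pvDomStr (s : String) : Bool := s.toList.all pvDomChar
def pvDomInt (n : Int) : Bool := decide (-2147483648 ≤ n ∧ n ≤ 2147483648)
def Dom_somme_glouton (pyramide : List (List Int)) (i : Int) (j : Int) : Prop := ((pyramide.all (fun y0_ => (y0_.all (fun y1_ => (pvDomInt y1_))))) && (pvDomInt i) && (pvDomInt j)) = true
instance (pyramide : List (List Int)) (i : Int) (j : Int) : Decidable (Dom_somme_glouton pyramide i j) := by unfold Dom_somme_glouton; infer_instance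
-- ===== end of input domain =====

-- B replaces A's recursive descent by an iterative loop with a running total (simpler; same O(n) cost).

-- ===== PORT A =====
-- literal port of the recursive greedy descent; where Python would raise IndexError
-- (excluded by Pre_) the port returns 0 / uses a default.
def somme_glouton (pyramide : List (List Int)) (i : Int) (j : Int) : Int :=
  if i = (pyramide.length : Int) - 1 then
    PySem.List.pyGetD (PySem.List.pyGetD pyramide i []) j 0
  else
    match h : PySem.List.pyGet? pyramide (i + 1) with
    | none => 0   -- Python raises here (pyramide[i+1] IndexError); outside Pre_
    | some row =>
      PySem.List.pyGetD (PySem.List.pyGetD pyramide i []) j 0 +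
        (if PySem.List.pyGetD row j 0 > PySem.List.pyGetD row (j + 1) 0 then
          somme_glouton pyramide (i + 1) j
        else
          somme_glouton pyramide (i + 1) (j + 1))
termination_by ((pyramide.length : Int) - 1 - i).toNat
decreasing_by
  all_goals
    have hr : ¬ (PySem.List.pyGet? pyramide (i + 1) = none) := by simp [h]
    rw [PySem.List.pyGet?_eq_none_iff] at hr
    have := not_not.mp hr
    unfold PySem.Raise.InRange at this
    omega

-- ===== PORT B =====
-- the while-loop of Source B: running total, current row i and column j
def sgIter (pyramide : List (List Int)) (total : Int) (i : Int) (j : Int) : Int :=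
  if i < (pyramide.length : Int) - 1 then
    sgIter pyramide (total + PySem.List.pyGetD (PySem.List.pyGetD pyramide i []) j 0)
      (i + 1)
      (if PySem.List.pyGetD (PySem.List.pyGetD pyramide (i + 1) []) j 0 ≤
          PySem.List.pyGetD (PySem.List.pyGetD pyramide (i + 1) []) (j + 1) 0
       then j + 1 else j)
  else
    total + PySem.List.pyGetD (PySem.List.pyGetD pyramide i []) j 0
termination_by ((pyramide.length : Int) - 1 - i).toNat
decreasing_by all_goals omega

def somme_glouton_alt (pyramide : List (List Int)) (i : Int) (j : Int) : Int :=
  sgIter pyramide 0 i j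

-- ===== PRECONDITION & SPEC =====
-- Pre_ excludes inputs where the descent would raise IndexError, and also (being a
-- worst-case row-length bound, row k long enough for column j + (k - i)) some ragged or
-- negative-index inputs on which A happens to return via a left-leaning path or Python's
-- negative-index wraparound; A and B agree there too, the bound is just conservative.
def Pre_somme_glouton (pyramide : List (List Int)) (i : Int) (j : Int) : Prop :=
  0 ≤ i ∧ i < (pyramide.length : Int) ∧ 0 ≤ j ∧
  ∀ k : Nat, k < pyramide.length → i ≤ (k : Int) →
    j + ((k : Int) - i) < ((pyramide.getD k []).length : Int)
instance (pyramide : List (List Int)) (i : Int) (j : Int) : Decidable (Pre_somme_glouton pyramide i j) := by unfold Pre_somme_glouton; infer_instance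

def pvWitness_somme_glouton : List (List Int) × Int × Int := ([[1], [2, 3]], 0, 0)

def Spec_somme_glouton (pyramide : List (List Int)) (i : Int) (j : Int) (out : Int) : Prop := out = somme_glouton_alt pyramide i j
instance (pyramide : List (List Int)) (i : Int) (j : Int) (out : Int) : Decidable (Spec_somme_glouton pyramide i j out) := by unfold Spec_somme_glouton; infer_instance

-- ===== CLAIM (what is proved, stated in full; the proofs are below) =====
def Claim_equal_somme_glouton : Prop := ∀ (pyramide : List (List Int)) (i : Int) (j : Int), Dom_somme_glouton pyramide i j → Pre_somme_glouton pyramide i j → Spec_somme_glouton pyramide i j (somme_glouton pyramide i j)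

-- ===== LEMMAS AND PROOFS =====

-- loop invariant: the iterative descent with accumulator equals total + the recursive sum
theorem sgIter_eq (pyramide : List (List Int)) (i j total : Int)
    (h0 : 0 ≤ i) (h1 : i < (pyramide.length : Int)) :
    sgIter pyramide total i j = total + somme_glouton pyramide i j := by
  rw [sgIter, somme_glouton]
  by_cases hlt : i < (pyramide.length : Int) - 1
  · have hne : ¬ i = (pyramide.length : Int) - 1 := by omega
    have hi0 : (0:Int) ≤ i + 1 := by omega
    have hi1 : i + 1 < (pyramide.length : Int) := by omega
    have hsome := PySem.List.pyGet?_eq_some_getElem pyramide hi0 hi1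
    have hD := PySem.List.pyGetD_eq_getElem pyramide ([] : List Int) hi0 hi1
    rw [if_pos hlt, if_neg hne]
    by_cases hc : PySem.List.pyGetD (PySem.List.pyGetD pyramide (i + 1) []) j 0 ≤
        PySem.List.pyGetD (PySem.List.pyGetD pyramide (i + 1) []) (j + 1) 0
    · rw [if_pos hc]
      split
      · next hnone => rw [hsome] at hnone; cases hnone
      · next row hrow =>
        rw [hsome] at hrow
        injection hrow with hrow
        subst hrow
        rw [hD] at hc
        rw [if_neg (by omega), sgIter_eq pyramide (i + 1) (j + 1) _ (by omega) (by omega)]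
        ring
    · rw [if_neg hc]
      split
      · next hnone => rw [hsome] at hnone; cases hnone
      · next row hrow =>
        rw [hsome] at hrow
        injection hrow with hrow
        subst hrow
        rw [hD] at hc
        rw [if_pos (by omega), sgIter_eq pyramide (i + 1) j _ (by omega) (by omega)]
        ring
  · have heq : i = (pyramide.length : Int) - 1 := by omega
    simp [heq]
termination_by ((pyramide.length : Int) - 1 - i).toNat
decreasing_by all_goals omega

-- ===== VERDICT (by name: the statement is the Claim_ definition above) =====
theorem somme_glouton_spec : Claim_equal_somme_glouton := by
  intro pyramide i j _ hpre
  obtain ⟨h0, h1, -, -⟩ := hpre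
  unfold Spec_somme_glouton somme_glouton_alt
  rw [sgIter_eq pyramide i j 0 h0 h1, zero_add]
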